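-- pv_equiv track=rewrite | github.com/Jerry1014/Extract_Archive | extracr_test.py | cheakcrossing
-- ===== SOURCE A (Python) =====
-- def cheakcrossing(passwordlist,order,begin_end):
--     bookmark = 1
--     while passwordlist[order] > begin_end[bookmark]:
--         bookmark += 2
--
--     if passwordlist[order] == begin_end[bookmark]:
--         if bookmark+1 < len(begin_end):
--             passwordlist[order] = begin_end[bookmark+1]
--             return False
--         else:
--             passwordlist[order-1] += 1
--             if order > 0:
--                 passwordlist[order] = begin_end[0]
--                 cheakcrossing(passwordlist,order-1,begin_end)
--             return True
-- ===== SOURCE B (Python) =====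
-- def cheakcrossing(passwordlist, order, begin_end):
--     # The password table begin_end lists ranges as [begin0, end0, begin1, end1, ...].
--     # Decide the outcome from the current digit alone, then ripple any carry
--     # through the lower digits with a plain loop.
--     ends = begin_end[1::2]
--     v = passwordlist[order]
--     k = next(i for i, e in enumerate(ends) if v <= e)
--     if v < ends[k]:
--         # still strictly inside a range: nothing crossed
--         return None
--     if 2 * k + 2 < len(begin_end):
--         # reached the end of a range: jump to the next range's begin
--         passwordlist[order] = begin_end[2 * k + 2]
--         return False
--     # overflowed the whole table: carry into the lower digits
--     o = order
--     while True:
--         passwordlist[o - 1] += 1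
--         if o <= 0:
--             return True
--         passwordlist[o] = begin_end[0]
--         o -= 1
--         w = passwordlist[o]
--         k = next(i for i, e in enumerate(ends) if w <= e)
--         if w < ends[k]:
--             return True
--         if 2 * k + 2 < len(begin_end):
--             passwordlist[o] = begin_end[2 * k + 2]
--             return True
--         # this digit overflowed too: keep carrying
-- ===== Notes on version B (the rewrite author's own statement) =====
-- stated objective: simpler
-- what changed: B decides the outcome of the current digit up front (still-inside / next-range / overflow) and then ripples the carry through the lower digits with a plain while loop, instead of A's recursion whose inner return values are ignored; the scan for the matching end bound is a first-match search over the precomputed odd-index slice instead of A's index-stepping while loop; Pre_ excludes exactly the inputs on which A raises IndexError (bad order index, a digit value above every end bound, or passwordlist[order-1] out of range in the carry case).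
import Mathlib
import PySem

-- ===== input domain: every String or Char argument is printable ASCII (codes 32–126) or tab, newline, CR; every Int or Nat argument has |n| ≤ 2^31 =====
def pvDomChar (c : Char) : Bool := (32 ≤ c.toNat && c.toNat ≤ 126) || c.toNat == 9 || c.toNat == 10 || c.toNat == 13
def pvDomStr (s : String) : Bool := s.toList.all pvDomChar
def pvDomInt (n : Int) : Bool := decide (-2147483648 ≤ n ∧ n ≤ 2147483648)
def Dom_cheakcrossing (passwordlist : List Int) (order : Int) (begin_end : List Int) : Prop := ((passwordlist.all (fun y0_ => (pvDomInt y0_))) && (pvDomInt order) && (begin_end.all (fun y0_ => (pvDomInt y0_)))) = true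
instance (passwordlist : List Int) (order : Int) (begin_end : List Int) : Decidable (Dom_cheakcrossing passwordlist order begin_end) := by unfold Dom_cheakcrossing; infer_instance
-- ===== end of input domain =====

-- B decides the current digit's outcome up front and ripples the carry with a plain
-- while loop (no recursion); objective: simpler.  Both A and B mutate passwordlist in
-- place identically; the equivalence proved here is about the RETURN value only.

-- ===== PORT A =====
-- the while loop: first odd bookmark (1, 3, 5, …) with v ≤ begin_end[bookmark]; none = IndexError
def pvScanA (v : Int) (be : List Int) (bookmark : Nat) : Option Nat :=
  match h : be[bookmark]? with
  | none => none
  | some b => if v > b then pvScanA v be (bookmark + 2) else some bookmark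
termination_by be.length - bookmark
decreasing_by
  obtain ⟨hlt, -⟩ := List.getElem?_eq_some_iff.mp h
  omega

-- A's body; result: none = an exception escaped, some (finalList, r) = normal return
-- (r : Option Bool, none = Python None).  fuel = recursion depth bound; order only
-- decreases below 0 < order, so order.toNat + 1 fuel is never exhausted.
def pvAuxA (passwordlist : List Int) (order : Int) (begin_end : List Int) : Nat → Option (List Int × Option Bool)
  | 0 => none
  | fuel + 1 =>
    match PySem.List.pyGet? passwordlist order with
    | none => none
    | some v =>
      match pvScanA v begin_end 1 with
      | none => none
      | some bookmark =>
        match begin_end[bookmark]? with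
        | none => none
        | some b =>
          if v = b then
            if bookmark + 1 < begin_end.length then
              match begin_end[bookmark + 1]? with
              | none => none
              | some nb => some (PySem.List.pySetD passwordlist order nb, some false)
            else
              match PySem.List.pyGet? passwordlist (order - 1) with
              | none => none
              | some w =>
                let pl1 := PySem.List.pySetD passwordlist (order - 1) (w + 1)
                if 0 < order then
                  match begin_end[0]? with
                  | none => none
                  | some b0 =>
                    match pvAuxA (PySem.List.pySetD pl1 order b0) (order - 1) begin_end fuel with
                    | none => none
                    | some (plF, _) => some (plF, some true)
                else some (pl1, some true)
          else some (passwordlist, none)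

def cheakcrossing (passwordlist : List Int) (order : Int) (begin_end : List Int) : Option Bool :=
  match pvAuxA passwordlist order begin_end (order.toNat + 1) with
  | none => none
  | some (_, r) => r

-- ===== PORT B =====
-- hand port of begin_end[1::2] (step-2 slice from index 1; exact)
def pvOddSlice : List Int → List Int
  | [] => []
  | [_] => []
  | _ :: y :: t => y :: pvOddSlice t

-- Source B's carry loop ('while True'); the first-match generator 'next(i for i, e in
-- enumerate(ends) if w <= e)' is findIdx? (none = the StopIteration escaping); fuel as
-- for A (the loop only continues while 0 < o).
def pvCarryLoop (begin_end ends : List Int) (pl : List Int) (o : Int) : Nat → Option Bool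
  | 0 => none
  | fuel + 1 =>
    match PySem.List.pyGet? pl (o - 1) with
    | none => none
    | some w0 =>
      let pl1 := PySem.List.pySetD pl (o - 1) (w0 + 1)
      if o ≤ 0 then some true
      else
        match begin_end[0]? with
        | none => none
        | some b0 =>
          let pl2 := PySem.List.pySetD pl1 o b0
          match PySem.List.pyGet? pl2 (o - 1) with
          | none => none
          | some w =>
            match ends.findIdx? (fun e => decide (w ≤ e)) with
            | none => none
            | some k =>
              if w < ends[k]! then some true
              else if 2 * k + 2 < begin_end.length then some true
              else pvCarryLoop begin_end ends pl2 (o - 1) fuel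

def cheakcrossing_alt (passwordlist : List Int) (order : Int) (begin_end : List Int) : Option Bool :=
  match PySem.List.pyGet? passwordlist order with
  | none => none
  | some v =>
    match (pvOddSlice begin_end).findIdx? (fun e => decide (v ≤ e)) with
    | none => none
    | some k =>
      if v < (pvOddSlice begin_end)[k]! then none
      else if 2 * k + 2 < begin_end.length then some false
      else pvCarryLoop begin_end (pvOddSlice begin_end) passwordlist order (order.toNat + 1)

-- ===== PRECONDITION & SPEC =====
-- (helpers of Pre_ only; they do not touch either port)
-- some odd-position end bound admits v (⟺ the scan for v terminates)
def pvSafe (be : List Int) (v : Int) : Prop :=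
  ∃ j, j < be.length ∧ j % 2 = 1 ∧ v ≤ be[j]!

-- the FIRST odd-position end bound admitting v equals v and is the last entry (the carry case)
def pvCarry (be : List Int) (v : Int) : Prop :=
  ∃ j, j < be.length ∧ j % 2 = 1 ∧ be.length = j + 1 ∧ v = be[j]! ∧
    ∀ j', j' < j → j' % 2 = 1 → be[j']! < v

-- Pre_ excludes exactly the inputs on which A raises IndexError: order out of range for
-- passwordlist, some visited digit's value above every odd-index end bound (the digit at
-- position i is visited by the carry chain iff every digit strictly between i and order
-- carries after +1), or passwordlist[order-1] out of range in the carry case.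
def Pre_cheakcrossing (passwordlist : List Int) (order : Int) (begin_end : List Int) : Prop :=
  (PySem.List.pyGet? passwordlist order).isSome = true ∧
  pvSafe begin_end ((PySem.List.pyGet? passwordlist order).getD 0) ∧
  (pvCarry begin_end ((PySem.List.pyGet? passwordlist order).getD 0) →
    (PySem.List.pyGet? passwordlist (order - 1)).isSome = true ∧
    ∀ i, i < order.toNat →
      (∀ j, j < order.toNat → i < j → pvCarry begin_end (passwordlist[j]! + 1)) →
      pvSafe begin_end (passwordlist[i]! + 1))

instance (passwordlist : List Int) (order : Int) (begin_end : List Int) : Decidable (Pre_cheakcrossing passwordlist order begin_end) := by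
  unfold Pre_cheakcrossing
  refine @instDecidableAnd _ _ ?_ (@instDecidableAnd _ _ ?_ ?_)
  · infer_instance
  · unfold pvSafe; infer_instance
  · have hca : Decidable (pvCarry begin_end ((PySem.List.pyGet? passwordlist order).getD 0)) := by
      unfold pvCarry; infer_instance
    have hball : Decidable (∀ i, i < order.toNat →
        (∀ j, j < order.toNat → i < j → pvCarry begin_end (passwordlist[j]! + 1)) →
        pvSafe begin_end (passwordlist[i]! + 1)) := by
      unfold pvSafe pvCarry
      exact Nat.decidableBallLT _ _
    have hcons : Decidable ((PySem.List.pyGet? passwordlist (order - 1)).isSome = true ∧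
        ∀ i, i < order.toNat →
          (∀ j, j < order.toNat → i < j → pvCarry begin_end (passwordlist[j]! + 1)) →
          pvSafe begin_end (passwordlist[i]! + 1)) := @instDecidableAnd _ _ inferInstance hball
    exact match hca with
      | isTrue h =>
        match hcons with
        | isTrue h2 => isTrue (fun _ => h2)
        | isFalse h2 => isFalse (fun f => h2 (f h))
      | isFalse h => isTrue (fun hh => absurd hh h)

def pvWitness_cheakcrossing : List Int × Int × List Int := ([1], 0, [0, 5])

def Spec_cheakcrossing (passwordlist : List Int) (order : Int) (begin_end : List Int) (out : Option Bool) : Prop := out = cheakcrossing_alt passwordlist order begin_end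
instance (passwordlist : List Int) (order : Int) (begin_end : List Int) (out : Option Bool) : Decidable (Spec_cheakcrossing passwordlist order begin_end out) := by unfold Spec_cheakcrossing; infer_instance

-- ===== CLAIM (what is proved, stated in full; the proofs are below) =====
def Claim_equal_cheakcrossing : Prop := ∀ (passwordlist : List Int) (order : Int) (begin_end : List Int), Dom_cheakcrossing passwordlist order begin_end → Pre_cheakcrossing passwordlist order begin_end → Spec_cheakcrossing passwordlist order begin_end (cheakcrossing passwordlist order begin_end)

-- ===== LEMMAS AND PROOFS =====

-- non-dependent unfolding of pvScanA
theorem pv_scanA_unfold (v : Int) (be : List Int) (bm : Nat) :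
    pvScanA v be bm = match be[bm]? with
      | none => none
      | some b => if v > b then pvScanA v be (bm + 2) else some bm := by
  rw [pvScanA.eq_def]
  split
  case h_1 heq => rw [heq]
  case h_2 b heq => rw [heq]

theorem pv_scan_shift (v x y : Int) (t : List Int) (m : Nat) :
    pvScanA v (x :: y :: t) (m + 2) = (pvScanA v t m).map (· + 2) := by
  rw [pv_scanA_unfold, pv_scanA_unfold v t m]
  have hidx : (x :: y :: t)[m + 2]? = t[m]? := by simp
  rw [hidx]
  cases heq : t[m]? with
  | none => simp
  | some b =>
    by_cases hv : v > b
    · simp only [if_pos hv, pv_scan_shift v x y t (m + 2)]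
    · simp [if_neg hv]
termination_by t.length - m
decreasing_by
  obtain ⟨hlt, -⟩ := List.getElem?_eq_some_iff.mp heq
  omega

theorem pv_scan_eq (be : List Int) (v : Int) :
    pvScanA v be 1 =
      ((pvOddSlice be).findIdx? (fun e => decide (v ≤ e))).map (fun k => 2 * k + 1) := by
  match be with
  | [] => rw [pv_scanA_unfold]; simp [pvOddSlice]
  | [x] => rw [pv_scanA_unfold]; simp [pvOddSlice]
  | x :: y :: t =>
    rw [pv_scanA_unfold]
    simp only [List.getElem?_cons_succ, List.getElem?_cons_zero, pvOddSlice, List.findIdx?_cons]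
    by_cases hv : v > y
    · rw [if_pos hv, pv_scan_shift v x y t 1, pv_scan_eq t v]
      have hd : (decide (v ≤ y)) = false := by simp; omega
      simp only [hd, Bool.false_eq_true, if_false, Option.map_map]
      cases (pvOddSlice t).findIdx? (fun e => decide (v ≤ e)) <;> simp [Function.comp, Nat.mul_add]
    · have hd : (decide (v ≤ y)) = true := by simp; omega
      simp [hv, hd]

theorem pv_odd_get (t : List Int) (k : Nat) : (pvOddSlice t)[k]? = t[2 * k + 1]? := by
  match t with
  | [] => simp [pvOddSlice]
  | [x] => simp [pvOddSlice]
  | x :: y :: t =>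
    match k with
    | 0 => simp [pvOddSlice]
    | k + 1 =>
      simp only [pvOddSlice, List.getElem?_cons_succ]
      rw [pv_odd_get t k]
      rw [show 2 * (k + 1) = 2 * k + 1 + 1 from by ring]
      simp

theorem pv_odd_getBang (be : List Int) (k : Nat) (hk : 2 * k + 1 < be.length) :
    (pvOddSlice be)[k]! = be[2 * k + 1] := by
  have h := pv_odd_get be k
  rw [List.getElem?_eq_getElem hk] at h
  obtain ⟨hlt, hval⟩ := List.getElem?_eq_some_iff.mp h
  rw [getElem!_pos (pvOddSlice be) k hlt]
  exact hval

theorem pv_safe_iff (be : List Int) (v : Int) :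
    pvSafe be v ↔ ((pvOddSlice be).findIdx? (fun e => decide (v ≤ e))).isSome := by
  rw [List.findIdx?_isSome, List.any_eq_true]
  constructor
  · rintro ⟨j, hj, hodd, hle⟩
    obtain ⟨k, hk⟩ : ∃ k, j = 2 * k + 1 := ⟨j / 2, by omega⟩
    subst hk
    have hmem : be[2 * k + 1] ∈ pvOddSlice be := List.mem_of_getElem?
      (by rw [pv_odd_get]; exact List.getElem?_eq_getElem hj)
    refine ⟨be[2 * k + 1], hmem, ?_⟩
    rw [getElem!_pos be _ hj] at hle
    simpa using hle
  · rintro ⟨e, he, hp⟩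
    obtain ⟨k, hk, hke⟩ := List.getElem_of_mem he
    have hq : be[2 * k + 1]? = some e := by
      rw [← pv_odd_get, ← hke]; exact List.getElem?_eq_getElem hk
    obtain ⟨hlt, hval⟩ := List.getElem?_eq_some_iff.mp hq
    exact ⟨2 * k + 1, hlt, by omega, by rw [getElem!_pos be _ hlt, hval]; simpa using hp⟩

-- the first admitting odd position, with its properties
theorem pv_first (be : List Int) (v : Int) (h : pvSafe be v) :
    ∃ k, (pvOddSlice be).findIdx? (fun e => decide (v ≤ e)) = some k ∧
      ∃ hk : 2 * k + 1 < be.length, v ≤ be[2 * k + 1] ∧ ∀ k' < k, be[2 * k' + 1]! < v := by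
  obtain ⟨k, hfind⟩ := Option.isSome_iff_exists.mp ((pv_safe_iff be v).mp h)
  obtain ⟨hklen, hp, hfirst⟩ := List.findIdx?_eq_some_iff_getElem.mp hfind
  have hq : be[2 * k + 1]? = some (pvOddSlice be)[k] := by
    rw [← pv_odd_get]; exact List.getElem?_eq_getElem hklen
  obtain ⟨hlt, hval⟩ := List.getElem?_eq_some_iff.mp hq
  refine ⟨k, hfind, hlt, by rw [hval]; simpa using hp, ?_⟩
  intro k' hk'
  have hkl : k' < (pvOddSlice be).length := by omega
  have hq' : be[2 * k' + 1]? = some ((pvOddSlice be)[k']'hkl) := by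
    rw [← pv_odd_get]; exact List.getElem?_eq_getElem hkl
  obtain ⟨hlt', hval'⟩ := List.getElem?_eq_some_iff.mp hq'
  rw [getElem!_pos be _ hlt', hval']
  have := hfirst k' hk'
  simp at this
  omega

-- derive pvCarry at the first admitting position when it is last and equal
theorem pv_mk_carry (be : List Int) (v : Int) (k : Nat) (hk : 2 * k + 1 < be.length)
    (hlast : ¬ 2 * k + 1 + 1 < be.length) (heq : v = be[2 * k + 1])
    (hfirst : ∀ k' < k, be[2 * k' + 1]! < v) : pvCarry be v := by
  refine ⟨2 * k + 1, hk, by omega, by omega,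
    by rw [getElem!_pos be _ hk]; exact heq, ?_⟩
  intro j' hj' hodd
  obtain ⟨k', rfl⟩ : ∃ k', j' = 2 * k' + 1 := ⟨j' / 2, by omega⟩
  exact hfirst k' (by omega)

-- the carry chain terminates with 'True' in B's loop
theorem pv_chainB (be ends pl : List Int) (o : Nat) (fuel : Nat)
    (hends : ends = pvOddSlice be)
    (hfuel : o + 1 < fuel) (hlen : o + 1 < pl.length)
    (hsafe : pvSafe be (pl[o]! + 1))
    (hlow : ∀ i, i < o →
      (pvCarry be (pl[o]! + 1) ∧ ∀ j, j < o → i < j → pvCarry be (pl[j]! + 1)) →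
      pvSafe be (pl[i]! + 1)) :
    pvCarryLoop be ends pl ((o + 1 : Nat) : Int) fuel = some true := by
  subst hends
  induction o using Nat.strong_induction_on generalizing pl fuel with
  | _ o IH =>
  match fuel, hfuel with
  | fuel + 1, hfuel =>
  have hbe : 0 < be.length := by obtain ⟨j0, hj0, -, -⟩ := hsafe; omega
  rw [pvCarryLoop]
  have hc1 : ((o + 1 : Nat) : Int) - 1 = ((o : Nat) : Int) := by push_cast; ring
  rw [hc1, PySem.List.pyGet?_natCast,
    List.getElem?_eq_getElem (show o < pl.length by omega)]
  dsimp only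
  simp only [PySem.List.pySetD_natCast]
  rw [if_neg (show ¬ ((o + 1 : Nat) : Int) ≤ 0 by omega)]
  rw [List.getElem?_eq_getElem hbe]
  dsimp only
  rw [PySem.List.pyGet?_natCast,
    List.getElem?_eq_getElem (show o < ((pl.set o (pl[o] + 1)).set (o + 1) be[0]).length by
      simp only [List.length_set]; omega)]
  dsimp only
  rw [List.getElem_set_ne (by omega), List.getElem_set_self (by simp only [List.length_set]; omega)]
  rw [getElem!_pos pl _ (by omega)] at hsafe hlow
  obtain ⟨k, hfind, hk, hle, hfirst⟩ := pv_first be (pl[o] + 1) hsafe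
  rw [hfind]
  dsimp only
  rw [pv_odd_getBang be k hk]
  by_cases hvlt : pl[o] + 1 < be[2 * k + 1]
  · rw [if_pos hvlt]
  · rw [if_neg hvlt]
    by_cases hlast : 2 * k + 2 < be.length
    · rw [if_pos hlast]
    · rw [if_neg hlast]
      have heqv : pl[o] + 1 = be[2 * k + 1] := by omega
      have hcar : pvCarry be (pl[o] + 1) :=
        pv_mk_carry be _ k hk (by omega) heqv hfirst
      rcases o with _ | m
      · obtain ⟨fuel', rfl⟩ : ∃ f', fuel = f' + 1 := ⟨fuel - 1, by omega⟩
        rw [pvCarryLoop]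
        have hz : ((0 : Nat) : Int) - 1 = -1 := by norm_num
        rw [hz, PySem.List.pyGet?_neg_one]
        have hne : ((pl.set 0 (pl[0] + 1)).set (0 + 1) be[0]) ≠ [] :=
          List.ne_nil_of_length_pos (by simp only [List.length_set]; omega)
        obtain ⟨w, hw⟩ := Option.isSome_iff_exists.mp (List.getLast?_isSome.mpr hne)
        rw [hw]
        dsimp only
        norm_num
      · refine IH m (by omega) ((pl.set (m + 1) (pl[m + 1] + 1)).set (m + 1 + 1) be[0]) fuel
          (by omega) (by simp only [List.length_set]; omega) ?_ ?_
        · rw [getElem!_pos _ _ (by simp only [List.length_set]; omega),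
            List.getElem_set_ne (by omega), List.getElem_set_ne (by omega),
            ← getElem!_pos pl m (by omega)]
          refine hlow m (by omega) ⟨hcar, ?_⟩
          intro j hj hij; omega
        · intro i hi H
          obtain ⟨H1, H2⟩ := H
          rw [getElem!_pos _ _ (by simp only [List.length_set]; omega),
            List.getElem_set_ne (by omega), List.getElem_set_ne (by omega)] at H1
          rw [getElem!_pos _ _ (by simp only [List.length_set]; omega),
            List.getElem_set_ne (by omega), List.getElem_set_ne (by omega),
            ← getElem!_pos pl i (by omega)]
          refine hlow i (by omega) ⟨hcar, ?_⟩
          intro j hj hij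
          rcases (by omega : j = m ∨ j < m) with rfl | hjm
          · rw [← getElem!_pos pl j (by omega)] at H1
            exact H1
          · have := H2 j hjm hij
            rw [getElem!_pos _ _ (by simp only [List.length_set]; omega),
              List.getElem_set_ne (by omega), List.getElem_set_ne (by omega),
              ← getElem!_pos pl j (by omega)] at this
            exact this

-- the carry chain never exhausts A's recursion (it returns SOME result)
theorem pv_chainA (be : List Int) (o : Nat) (pl : List Int) (fuel : Nat)
    (hfuel : o < fuel) (hlen : o < pl.length)
    (hsafe : pvSafe be pl[o]!)
    (hlow : ∀ i, i < o →
      (pvCarry be pl[o]! ∧ ∀ j, j < o → i < j → pvCarry be (pl[j]! + 1)) →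
      pvSafe be (pl[i]! + 1)) :
    ∃ plF r, pvAuxA pl (o : Int) be fuel = some (plF, r) := by
  induction o using Nat.strong_induction_on generalizing pl fuel with
  | _ o IH =>
  match fuel, hfuel with
  | fuel + 1, hfuel =>
  rw [pvAuxA]
  have hv : PySem.List.pyGet? pl (o : Int) = some pl[o] := by
    rw [PySem.List.pyGet?_natCast]; exact List.getElem?_eq_getElem hlen
  rw [hv]
  dsimp only
  rw [getElem!_pos pl _ hlen] at hsafe hlow
  obtain ⟨k, hfind, hk, hle, hfirst⟩ := pv_first be pl[o] hsafe
  rw [pv_scan_eq, hfind]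
  simp only [Option.map_some]
  rw [List.getElem?_eq_getElem hk]
  dsimp only
  by_cases heq : pl[o] = be[2 * k + 1]
  · rw [if_pos heq]
    by_cases hlast : 2 * k + 1 + 1 < be.length
    · rw [if_pos hlast, List.getElem?_eq_getElem hlast]
      exact ⟨_, _, rfl⟩
    · rw [if_neg hlast]
      have hcar : pvCarry be pl[o] := pv_mk_carry be _ k hk hlast heq hfirst
      match o, hlen, hsafe, hlow, hcar, IH with
      | 0, h0, hsafe, hlow, hcar, IH =>
        have hm1 : ((0 : Nat) : Int) - 1 = -1 := by norm_num
        rw [hm1, PySem.List.pyGet?_neg_one]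
        obtain ⟨w, hw⟩ := Option.isSome_iff_exists.mp
          (List.getLast?_isSome.mpr (List.ne_nil_of_length_pos h0))
        rw [hw]
        dsimp only
        rw [if_neg (show ¬ (0 : Int) < ((0 : Nat) : Int) by norm_num)]
        exact ⟨_, _, rfl⟩
      | m + 1, h0, hsafe, hlow, hcar, IH =>
        have hc : ((m + 1 : Nat) : Int) - 1 = ((m : Nat) : Int) := by push_cast; ring
        rw [hc, PySem.List.pyGet?_natCast,
          List.getElem?_eq_getElem (show m < pl.length by omega)]
        dsimp only
        rw [if_pos (show (0 : Int) < ((m + 1 : Nat) : Int) by omega)]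
        rw [List.getElem?_eq_getElem (show 0 < be.length by omega)]
        simp only [PySem.List.pySetD_natCast]
        obtain ⟨plF, r, hrec⟩ := IH m (by omega)
          ((pl.set m (pl[m] + 1)).set (m + 1) be[0]) fuel (by omega)
          (by simp only [List.length_set]; omega)
          (by
            rw [getElem!_pos _ _ (by simp only [List.length_set]; omega),
              List.getElem_set_ne (by omega),
              List.getElem_set_self (by simp only [List.length_set]; omega),
              ← getElem!_pos pl m (by omega)]
            refine hlow m (by omega) ⟨hcar, ?_⟩
            intro j hj hij; omega)
          (by
            intro i hi H
            obtain ⟨H1, H2⟩ := H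
            rw [getElem!_pos _ _ (by simp only [List.length_set]; omega),
              List.getElem_set_ne (by omega),
              List.getElem_set_self (by simp only [List.length_set]; omega)] at H1
            rw [getElem!_pos _ _ (by simp only [List.length_set]; omega),
              List.getElem_set_ne (by omega), List.getElem_set_ne (by omega),
              ← getElem!_pos pl i (by omega)]
            refine hlow i (by omega) ⟨hcar, ?_⟩
            intro j hj hij
            rcases (by omega : j = m ∨ j < m) with rfl | hjm
            · rw [← getElem!_pos pl j (by omega)] at H1
              exact H1
            · have := H2 j hjm hij
              rw [getElem!_pos _ _ (by simp only [List.length_set]; omega),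
                List.getElem_set_ne (by omega), List.getElem_set_ne (by omega),
                ← getElem!_pos pl j (by omega)] at this
              exact this)
        rw [hrec]
        exact ⟨_, _, rfl⟩
  · rw [if_neg heq]
    exact ⟨_, _, rfl⟩

-- ===== VERDICT (by name: the statement is the Claim_ definition above) =====
theorem cheakcrossing_spec : Claim_equal_cheakcrossing := by
  intro pl order be _hdom hpre
  obtain ⟨hg, hsafe0, hcarry⟩ := hpre
  obtain ⟨v, hv⟩ := Option.isSome_iff_exists.mp hg
  rw [hv] at hsafe0 hcarry
  simp only [Option.getD_some] at hsafe0 hcarry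
  unfold Spec_cheakcrossing cheakcrossing cheakcrossing_alt
  rw [pvAuxA, hv]
  dsimp only
  obtain ⟨k, hfind, hk, hle, hfirst⟩ := pv_first be v hsafe0
  rw [pv_scan_eq, hfind]
  simp only [Option.map_some]
  rw [List.getElem?_eq_getElem hk]
  dsimp only
  rw [pv_odd_getBang be k hk]
  by_cases hvlt : v < be[2 * k + 1]
  · rw [if_neg (show ¬ v = be[2 * k + 1] by omega), if_pos hvlt]
  · have heq : v = be[2 * k + 1] := by omega
    rw [if_pos heq, if_neg hvlt]
    by_cases hlast : 2 * k + 1 + 1 < be.length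
    · rw [if_pos hlast, if_pos (show 2 * k + 2 < be.length by omega),
        List.getElem?_eq_getElem hlast]
    · rw [if_neg hlast, if_neg (show ¬ 2 * k + 2 < be.length by omega)]
      have hcar : pvCarry be v := pv_mk_carry be v k hk hlast heq hfirst
      obtain ⟨hg1, hlow⟩ := hcarry hcar
      obtain ⟨w, hw⟩ := Option.isSome_iff_exists.mp hg1
      by_cases hpos : 0 < order
      · -- order > 0: both sides run the carry chain and return True
        obtain ⟨O, rfl⟩ : ∃ O : Nat, order = ((O : Nat) : Int) := ⟨order.toNat, by omega⟩
        simp only [Int.toNat_natCast] at hlow ⊢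
        have holen : O < pl.length := by
          rw [PySem.List.pyGet?_natCast] at hv
          exact (List.getElem?_eq_some_iff.mp hv).1
        have hOw : pl[O - 1]'(by omega) = w := by
          rw [show ((O : Nat) : Int) - 1 = ((O - 1 : Nat) : Int) by omega,
            PySem.List.pyGet?_natCast] at hw
          exact (List.getElem?_eq_some_iff.mp hw).2
        rw [hw]
        dsimp only
        rw [if_pos hpos, List.getElem?_eq_getElem (show 0 < be.length by omega)]
        rw [show ((O : Nat) : Int) - 1 = ((O - 1 : Nat) : Int) by omega]
        simp only [PySem.List.pySetD_natCast]
        have hsafeB : pvSafe be (pl[O - 1]! + 1) := by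
          refine hlow (O - 1) (by omega) ?_
          intro j hj hij; omega
        have hlowB : ∀ i, i < O - 1 →
            (pvCarry be (pl[O - 1]! + 1) ∧
              ∀ j, j < O - 1 → i < j → pvCarry be (pl[j]! + 1)) →
            pvSafe be (pl[i]! + 1) := by
          intro i hi H
          refine hlow i (by omega) ?_
          intro j hj hij
          rcases (by omega : j = O - 1 ∨ j < O - 1) with rfl | hjm
          · exact H.1
          · exact H.2 j hjm hij
        have hsafeA : pvSafe be
            (((pl.set (O - 1) (w + 1)).set O be[0])[O - 1]!) := by
          rw [getElem!_pos _ _ (by simp only [List.length_set]; omega),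
            List.getElem_set_ne (by omega),
            List.getElem_set_self (by simp only [List.length_set]; omega)]
          rw [getElem!_pos pl _ (by omega), hOw] at hsafeB
          exact hsafeB
        have hlowA : ∀ i, i < O - 1 →
            (pvCarry be (((pl.set (O - 1) (w + 1)).set O be[0])[O - 1]!) ∧
              ∀ j, j < O - 1 → i < j →
                pvCarry be (((pl.set (O - 1) (w + 1)).set O be[0])[j]! + 1)) →
            pvSafe be (((pl.set (O - 1) (w + 1)).set O be[0])[i]! + 1) := by
          intro i hi H
          obtain ⟨H1, H2⟩ := H
          rw [getElem!_pos _ _ (by simp only [List.length_set]; omega),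
            List.getElem_set_ne (by omega),
            List.getElem_set_self (by simp only [List.length_set]; omega)] at H1
          rw [getElem!_pos _ _ (by simp only [List.length_set]; omega),
            List.getElem_set_ne (by omega), List.getElem_set_ne (by omega),
            ← getElem!_pos pl i (by omega)]
          refine hlowB i hi ⟨?_, ?_⟩
          · rw [getElem!_pos pl _ (by omega), hOw]; exact H1
          · intro j hj hij
            have := H2 j hj hij
            rw [getElem!_pos _ _ (by simp only [List.length_set]; omega),
              List.getElem_set_ne (by omega), List.getElem_set_ne (by omega),
              ← getElem!_pos pl j (by omega)] at this
            exact this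
        obtain ⟨plF, r, hA⟩ := pv_chainA be (O - 1)
          ((pl.set (O - 1) (w + 1)).set O be[0]) O
          (by omega) (by simp only [List.length_set]; omega) hsafeA hlowA
        have hB := pv_chainB be (pvOddSlice be) pl (O - 1) (O + 1) rfl
          (by omega) (by omega) hsafeB hlowB
        rw [show O - 1 + 1 = O by omega] at hB
        rw [hA, hB]
      · -- order ≤ 0: one step on each side, both return True
        rw [hw]
        dsimp only
        rw [if_neg hpos]
        have hfz : order.toNat + 1 = 0 + 1 := by omega
        rw [hfz, pvCarryLoop, hw]
        dsimp only
        rw [if_pos (show order ≤ 0 by omega)]
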